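-- pv_equiv track=rewrite | github.com/Ahannila/Algos | viikko3/sequences.py | count
-- ===== SOURCE A (Python) =====
-- def count(s):
--     count_tira = 0
--     running_counts = {'T': 0, 'I': 0, 'R': 0, 'A': 0}
--
--     for char in s:
--         char = char.upper()  # Consider both uppercase and lowercase letters
--
--         if char in running_counts:
--             count_tira += running_counts[char]
--
--         # Update running counts
--         for key in running_counts:
--             if key == char:
--                 running_counts[key] += 1
--             else:
--                 running_counts[key] = 0
--
--     return count_tira
-- ===== SOURCE B (Python) =====
-- from itertools import groupby
--
-- def count(s):
--     total = 0
--     for key, grp in groupby(c.upper() for c in s):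
--         run = sum(1 for _ in grp)
--         if key in ('T', 'I', 'R', 'A'):
--             total += run * (run - 1) // 2
--     return total
-- ===== Notes on version B (the rewrite author's own statement) =====
-- stated objective: simpler
-- what changed: Replaces the dict of four running counts with its per-character inner reset loop by a single groupby pass over the uppercased characters, adding the closed-form L*(L-1)//2 per TIRA run.
import Mathlib
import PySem

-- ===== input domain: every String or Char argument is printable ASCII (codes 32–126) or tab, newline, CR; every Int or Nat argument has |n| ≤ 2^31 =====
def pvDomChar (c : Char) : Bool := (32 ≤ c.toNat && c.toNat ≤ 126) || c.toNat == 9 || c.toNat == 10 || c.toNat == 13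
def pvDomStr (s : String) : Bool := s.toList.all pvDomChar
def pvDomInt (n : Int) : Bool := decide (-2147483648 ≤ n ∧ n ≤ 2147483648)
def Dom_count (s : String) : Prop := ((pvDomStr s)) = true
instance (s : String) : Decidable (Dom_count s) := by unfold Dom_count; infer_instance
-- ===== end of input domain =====

-- B replaces A's dict of four running counts (with its inner reset loop) by a
-- run-grouping pass plus the closed form L*(L-1)/2 per TIRA run (objective: simpler).


-- ===== PORT A =====
-- per-character step: 'if char in running_counts: count += running_counts[char]'
-- then 'for key in running_counts: ...' (keys are stable while only values change)
def countStep (st : Int × PySem.Dict Char Int) (ch : Char) : Int × PySem.Dict Char Int :=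
  let c := PySem.Chars.upperChar ch
  let t := if st.2.contains c then st.1 + st.2.getD c 0 else st.1
  let d := st.2.keys.foldl
    (fun d k => if k = c then d.insert k (d.getD k 0 + 1) else d.insert k 0) st.2
  (t, d)

def count (s : String) : Int :=
  (s.toList.foldl countStep
    (0, PySem.Dict.ofList [('T', 0), ('I', 0), ('R', 0), ('A', 0)])).1

-- ===== PORT B =====
-- groupby over the (already uppercased) stream: collect maximal runs as (key, length)
def tiraRuns : List Char → Char → Nat → List (Char × Nat)
  | [], k, n => [(k, n)]
  | c :: cs, k, n => if c = k then tiraRuns cs k (n + 1) else (k, n) :: tiraRuns cs c 1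

def runsOf : List Char → List (Char × Nat)
  | [] => []
  | c :: cs => tiraRuns cs c 1

-- per-group term: run*(run-1)//2 if the key is one of T,I,R,A
def contrib (p : Char × Nat) : Int :=
  if p.1 = 'T' ∨ p.1 = 'I' ∨ p.1 = 'R' ∨ p.1 = 'A' then ((p.2 * (p.2 - 1)) / 2 : Nat) else 0

def count_alt (s : String) : Int :=
  ((runsOf (s.toList.map PySem.Chars.upperChar)).map contrib).sum

-- ===== PRECONDITION & SPEC =====
def Spec_count (s : String) (out : Int) : Prop := out = count_alt s
instance (s : String) (out : Int) : Decidable (Spec_count s out) := by unfold Spec_count; infer_instance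

-- ===== CLAIM (what is proved, stated in full; the proofs are below) =====
def Claim_equal_count : Prop := ∀ (s : String), Dom_count s → Spec_count s (count s)

-- ===== LEMMAS AND PROOFS =====

-- the shape of A's dict: the current run (k, n); non-current keys are 0
def enc (k : Char) (n : Nat) : PySem.Dict Char Int :=
  PySem.Dict.mk [('T', if k = 'T' then (n : Int) else 0), ('I', if k = 'I' then (n : Int) else 0),
                 ('R', if k = 'R' then (n : Int) else 0), ('A', if k = 'A' then (n : Int) else 0)]


lemma tri (n : Nat) : (((n + 1) * n) / 2 : Nat) = ((n * (n - 1)) / 2 : Nat) + n := by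
  have h2 : 2 ∣ n * (n - 1) := by
    rcases Nat.even_or_odd n with h | h
    · exact Dvd.dvd.mul_right h.two_dvd _
    · cases n with
      | zero => simp
      | succ m =>
        have : Even (m + 1 - 1) := by simpa using (Nat.Odd.sub_odd h odd_one)
        exact Dvd.dvd.mul_left this.two_dvd _
  have hq : (n + 1) * n = n * (n - 1) + 2 * n := by
    cases n with
    | zero => simp
    | succ m => simp; ring
  omega

lemma contrib_diff (u k : Char) (n : Nat) :
    contrib (u, if u = k then n + 1 else 1) - contrib (u, if u = k then n else 0)
      = if u = k ∧ (u = 'T' ∨ u = 'I' ∨ u = 'R' ∨ u = 'A') then (n : Int) else 0 := by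
  by_cases h : u = k
  · subst h
    simp only [true_and, contrib]
    split_ifs with ht
    · rw [show n + 1 - 1 = n from rfl, tri n]
      push_cast
      ring
    · ring
  · simp [contrib, h]

lemma countStep_enc (k : Char) (n : Nat) (t : Int) (ch : Char) :
    countStep (t, enc k n) ch =
      (t + contrib (PySem.Chars.upperChar ch, if PySem.Chars.upperChar ch = k then n + 1 else 1)
         - contrib (PySem.Chars.upperChar ch, if PySem.Chars.upperChar ch = k then n else 0),
       enc (PySem.Chars.upperChar ch) (if PySem.Chars.upperChar ch = k then n + 1 else 1)) := by
  have key : ∀ v : Char, v = 'T' ∨ v = 'I' ∨ v = 'R' ∨ v = 'A' ∨ (v ≠ 'T' ∧ v ≠ 'I' ∧ v ≠ 'R' ∧ v ≠ 'A') := by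
    intro v
    by_cases h1 : v = 'T' <;> by_cases h2 : v = 'I' <;> by_cases h3 : v = 'R' <;> by_cases h4 : v = 'A' <;> simp_all
  have hd := contrib_diff (PySem.Chars.upperChar ch) k n
  unfold countStep
  rw [add_sub_assoc, hd]
  rcases key (PySem.Chars.upperChar ch) with h | h | h | h | ⟨hT, hI, hR, hA⟩
  case inl | inr.inl | inr.inr.inl | inr.inr.inr.inl =>
    rw [h]
    by_cases hk : k = PySem.Chars.upperChar ch
    · rw [h] at hk
      subst hk
      simp [enc, PySem.Dict.contains, PySem.Dict.getD, PySem.Dict.get?, PySem.Dict.insert,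
            PySem.Dict.keys, List.foldl]
    · rw [h] at hk
      simp [enc, PySem.Dict.contains, PySem.Dict.getD, PySem.Dict.get?, PySem.Dict.insert,
            PySem.Dict.keys, List.foldl, hk, Ne.symm hk]
  case inr.inr.inr.inr =>
    by_cases hk : k = PySem.Chars.upperChar ch
    · subst hk
      simp [enc, PySem.Dict.contains, PySem.Dict.getD, PySem.Dict.get?, PySem.Dict.insert,
            PySem.Dict.keys, List.foldl, hT, hI, hR, hA, Ne.symm hT, Ne.symm hI, Ne.symm hR, Ne.symm hA]
    · simp [enc, PySem.Dict.contains, PySem.Dict.getD, PySem.Dict.get?, PySem.Dict.insert,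
            PySem.Dict.keys, List.foldl, hT, hI, hR, hA, Ne.symm hT, Ne.symm hI, Ne.symm hR, Ne.symm hA,
            Ne.symm hk]


lemma contrib_base (u : Char) : contrib (u, 1) = 0 := by simp [contrib]
lemma contrib_zero (u : Char) : contrib (u, 0) = 0 := by simp [contrib]

lemma loop_eq (cs : List Char) (t : Int) (k : Char) (n : Nat) :
    (cs.foldl countStep (t, enc k n)).1 =
      t - contrib (k, n) + ((tiraRuns (cs.map PySem.Chars.upperChar) k n).map contrib).sum := by
  induction cs generalizing t k n with
  | nil => simp [tiraRuns]
  | cons c cs ih =>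
    simp only [List.foldl_cons, List.map_cons, countStep_enc, tiraRuns]
    by_cases h : PySem.Chars.upperChar c = k
    · subst h
      rw [if_pos rfl, if_pos rfl, if_pos rfl, ih]
      omega
    · rw [if_neg h, if_neg h, if_neg h, ih]
      have h1 := contrib_base (PySem.Chars.upperChar c)
      have h0 := contrib_zero (PySem.Chars.upperChar c)
      simp only [List.map_cons, List.sum_cons]
      omega

lemma runs_start (l : List Char) :
    ((tiraRuns l 'T' 0).map contrib).sum = ((runsOf l).map contrib).sum := by
  cases l with
  | nil => simp [tiraRuns, runsOf, contrib_zero]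
  | cons c cs =>
    simp only [tiraRuns, runsOf]
    by_cases h : c = 'T'
    · rw [if_pos h, h]
    · rw [if_neg h]
      simp [contrib_zero]

-- ===== VERDICT (by name: the statement is the Claim_ definition above) =====
theorem count_spec : Claim_equal_count := by
  intro s _
  show count s = count_alt s
  have hinit : PySem.Dict.ofList [(('T' : Char), (0 : Int)), ('I', 0), ('R', 0), ('A', 0)]
      = enc 'T' 0 := by decide
  unfold count count_alt
  rw [hinit, loop_eq, runs_start, contrib_zero]
  ring
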